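-- pv_equiv track=rewrite | github.com/godekq/feature-dwi | Soal_BLQ/Soal 21.py | urutan_walk_jump
-- ===== SOURCE A (Python) =====
-- def urutan_walk_jump(lintasan):
--     st = 0  # Stamina awal
--     hasil = []  # Inisialisasi hasil urutan langkah
--
--     for i, elemen in enumerate(lintasan):
--         # Jika player berada di lubang, cek apakah memiliki cukup ST untuk melompat
--         if elemen == 'O':
--             if st < 2:
--                 return "FAILED"  # Tidak cukup ST untuk melompat, hasilnya "FAILED"
--             else:
--                 st -= 2  # Kurangi ST untuk melompat
--                 hasil.append('J')  # Tambahkan langkah Jump ke hasil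
--         else:
--             st += 1  # Tambahkan ST untuk berjalan
--             hasil.append('W')  # Tambahkan langkah Walk ke hasil
--
--     return hasil
-- ===== SOURCE B (Python) =====
-- def urutan_walk_jump(lintasan):
--     # Feasibility pass: track stamina only; fail at first hole without 2 ST.
--     st = 0
--     for elemen in lintasan:
--         if elemen == 'O':
--             if st < 2:
--                 return "FAILED"
--             st -= 2
--         else:
--             st += 1
--     # Feasible: the step sequence is a pure element-wise map.
--     return ['J' if elemen == 'O' else 'W' for elemen in lintasan]
-- ===== Notes on version B (the rewrite author's own statement) =====
-- stated objective: simpler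
-- what changed: Replaces A's single interleaved scan that builds the result while tracking stamina with a stamina-only feasibility pass followed by a pure element-wise map over the track.
-- outside the precondition, e.g. on urutan_walk_jump(['O']): A returns 'FAILED', B returns 'FAILED'; on urutan_walk_jump(['W', 'O']): A returns 'FAILED', B returns 'FAILED'
import Mathlib
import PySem

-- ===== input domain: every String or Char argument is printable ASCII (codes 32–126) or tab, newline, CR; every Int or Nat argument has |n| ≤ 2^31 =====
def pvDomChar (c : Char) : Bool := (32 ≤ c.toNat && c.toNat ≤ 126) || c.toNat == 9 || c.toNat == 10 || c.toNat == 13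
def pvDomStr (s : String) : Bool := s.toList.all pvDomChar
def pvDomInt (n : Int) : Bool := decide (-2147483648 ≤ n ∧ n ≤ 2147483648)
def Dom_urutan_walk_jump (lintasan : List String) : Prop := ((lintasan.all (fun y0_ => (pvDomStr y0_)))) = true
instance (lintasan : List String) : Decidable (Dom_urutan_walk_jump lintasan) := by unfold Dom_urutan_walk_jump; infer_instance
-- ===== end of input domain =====

-- B replaces A's interleaved build-while-scanning with a stamina-only feasibility
-- pass followed by a pure element-wise map (objective: simpler decomposition).


-- ===== PORT A =====
-- A's loop: stamina st and accumulator hasil, early return "FAILED" (modelled as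
-- none, since the string "FAILED" is not a value of the declared List String type;
-- those inputs are excluded by Pre_).
def urutanWalkJumpGoA (st : Int) (hasil : List String) : List String → Option (List String)
  | [] => some hasil
  | elemen :: rest =>
    if elemen = "O" then
      if st < 2 then none
      else urutanWalkJumpGoA (st - 2) (hasil ++ ["J"]) rest
    else urutanWalkJumpGoA (st + 1) (hasil ++ ["W"]) rest

def urutan_walk_jump (lintasan : List String) : List String :=
  (urutanWalkJumpGoA 0 [] lintasan).getD []

-- ===== PORT B =====
-- B's feasibility pass: stamina only, no result built.
def urutanWalkJumpCheck (st : Int) : List String → Bool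
  | [] => true
  | elemen :: rest =>
    if elemen = "O" then
      if st < 2 then false
      else urutanWalkJumpCheck (st - 2) rest
    else urutanWalkJumpCheck (st + 1) rest

def urutan_walk_jump_alt (lintasan : List String) : List String :=
  if urutanWalkJumpCheck 0 lintasan then
    lintasan.map (fun elemen => if elemen = "O" then "J" else "W")
  else []

-- ===== PRECONDITION & SPEC =====
-- Pre_ excludes exactly the infeasible tracks, on which the Python A (and B)
-- returns the string "FAILED" — not a value of the declared list-of-steps type.
-- Closed form: before every hole, #walk-steps minus twice #holes so far is ≥ 2.
def Pre_urutan_walk_jump (lintasan : List String) : Prop :=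
  ∀ i < lintasan.length, lintasan[i]! = "O" →
    (((lintasan.take i).countP (fun e => e ≠ "O") : Int)
      - 2 * ((lintasan.take i).countP (fun e => e = "O") : Int)) ≥ 2
instance (lintasan : List String) : Decidable (Pre_urutan_walk_jump lintasan) := by
  unfold Pre_urutan_walk_jump; infer_instance

def pvWitness_urutan_walk_jump : List String := ["W", "W", "O", "W"]

def Spec_urutan_walk_jump (lintasan : List String) (out : List String) : Prop := out = urutan_walk_jump_alt lintasan
instance (lintasan : List String) (out : List String) : Decidable (Spec_urutan_walk_jump lintasan out) := by unfold Spec_urutan_walk_jump; infer_instance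

-- ===== CLAIM (what is proved, stated in full; the proofs are below) =====
def Claim_equal_urutan_walk_jump : Prop := ∀ (lintasan : List String), Dom_urutan_walk_jump lintasan → Pre_urutan_walk_jump lintasan → Spec_urutan_walk_jump lintasan (urutan_walk_jump lintasan)

-- ===== LEMMAS AND PROOFS =====

-- A's scan equals "check, then map", for every stamina and accumulator.
theorem urutanWalkJumpGoA_eq (l : List String) : ∀ (st : Int) (hasil : List String),
    urutanWalkJumpGoA st hasil l =
      if urutanWalkJumpCheck st l then
        some (hasil ++ l.map (fun elemen => if elemen = "O" then "J" else "W"))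
      else none := by
  induction l with
  | nil => intro st hasil; simp [urutanWalkJumpGoA, urutanWalkJumpCheck]
  | cons e rest ih =>
    intro st hasil
    by_cases he : e = "O"
    · by_cases hst : st < 2
      · simp [urutanWalkJumpGoA, urutanWalkJumpCheck, he, hst]
      · simp [urutanWalkJumpGoA, urutanWalkJumpCheck, he, hst, ih]
    · simp [urutanWalkJumpGoA, urutanWalkJumpCheck, he, ih]

-- ===== VERDICT (by name: the statement is the Claim_ definition above) =====
theorem urutan_walk_jump_spec : Claim_equal_urutan_walk_jump := by
  intro l _ _
  unfold Spec_urutan_walk_jump urutan_walk_jump urutan_walk_jump_alt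
  rw [urutanWalkJumpGoA_eq]
  by_cases h : urutanWalkJumpCheck 0 l <;> simp [h]
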